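-- pv_equiv track=rewrite | github.com/drmushfiq/cmsc-covid19 | core_tasks.py | set_cutoff
-- ===== SOURCE A (Python) =====
-- def set_cutoff(arr, cutoff):
--     '''
--     - takes an array and cutoff point as input
--     - sets all the values to 0 until the cutoff point is reached
--     - keeps the values as it is once the cutoff point is reached
--     '''
--     foundCutoff = False
--     result = []
--     for i in arr:
--         if foundCutoff == False:
--             if i < cutoff:
--                 result.append(0)
--             else:
--                 result.append(i)
--                 foundCutoff = True
--         else:
--             result.append(i)
--     return result
-- ===== SOURCE B (Python) =====
-- def set_cutoff(arr, cutoff):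
--     lst = list(arr)
--     idx = next((i for i, v in enumerate(lst) if v >= cutoff), len(lst))
--     return [0] * idx + lst[idx:]
-- ===== Notes on version B (the rewrite author's own statement) =====
-- stated objective: simpler
-- what changed: Replaces the per-element foundCutoff state machine with find-the-first-index-reaching-cutoff then assemble [0]*idx + tail.
import Mathlib
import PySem

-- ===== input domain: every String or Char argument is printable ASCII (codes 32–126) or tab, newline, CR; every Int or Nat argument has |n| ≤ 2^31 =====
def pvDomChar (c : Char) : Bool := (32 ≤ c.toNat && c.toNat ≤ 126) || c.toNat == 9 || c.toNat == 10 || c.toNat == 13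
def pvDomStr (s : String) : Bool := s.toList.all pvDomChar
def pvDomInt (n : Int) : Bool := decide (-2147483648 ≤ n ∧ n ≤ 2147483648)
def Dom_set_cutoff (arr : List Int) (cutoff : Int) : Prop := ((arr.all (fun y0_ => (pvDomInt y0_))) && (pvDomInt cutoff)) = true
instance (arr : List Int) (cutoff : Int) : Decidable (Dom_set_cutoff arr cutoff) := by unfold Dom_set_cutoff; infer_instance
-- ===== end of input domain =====

-- B drops A's foundCutoff state machine: it finds the first index reaching the cutoff, then builds [0]*idx ++ tail (objective: simpler).

-- ===== PORT A =====
-- loop with state (foundCutoff, result), appending per element as in A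
def set_cutoff (arr : List Int) (cutoff : Int) : List Int :=
  (arr.foldl (fun (st : Bool × List Int) i =>
      if st.1 = false then
        if i < cutoff then (st.1, st.2 ++ [0])
        else (true, st.2 ++ [i])
      else (st.1, st.2 ++ [i]))
    (false, [])).2

-- ===== PORT B =====
def set_cutoff_alt (arr : List Int) (cutoff : Int) : List Int :=
  let idx := arr.findIdx (fun v => cutoff ≤ v)   -- defaults to arr.length when none reaches cutoff
  List.replicate idx 0 ++ arr.drop idx

-- ===== PRECONDITION & SPEC =====
def Spec_set_cutoff (arr : List Int) (cutoff : Int) (out : List Int) : Prop := out = set_cutoff_alt arr cutoff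
instance (arr : List Int) (cutoff : Int) (out : List Int) : Decidable (Spec_set_cutoff arr cutoff out) := by unfold Spec_set_cutoff; infer_instance

-- ===== CLAIM (what is proved, stated in full; the proofs are below) =====
def Claim_equal_set_cutoff : Prop := ∀ (arr : List Int) (cutoff : Int), Dom_set_cutoff arr cutoff → Spec_set_cutoff arr cutoff (set_cutoff arr cutoff)

-- ===== LEMMAS AND PROOFS =====

-- once foundCutoff is true, the loop just appends the rest of the list
theorem set_cutoff_foldl_true (cutoff : Int) : ∀ (arr : List Int) (acc : List Int),
    (arr.foldl (fun (st : Bool × List Int) i =>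
      if st.1 = false then
        if i < cutoff then (st.1, st.2 ++ [0])
        else (true, st.2 ++ [i])
      else (st.1, st.2 ++ [i]))
    (true, acc)) = (true, acc ++ arr) := by
  intro arr
  induction arr with
  | nil => simp [List.foldl]
  | cons i t ih => intro acc; simp [List.foldl, ih]

-- the not-yet-found loop produces acc ++ B's result
theorem set_cutoff_foldl_false (cutoff : Int) : ∀ (arr : List Int) (acc : List Int),
    ((arr.foldl (fun (st : Bool × List Int) i =>
      if st.1 = false then
        if i < cutoff then (st.1, st.2 ++ [0])
        else (true, st.2 ++ [i])
      else (st.1, st.2 ++ [i]))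
    (false, acc))).2 = acc ++ set_cutoff_alt arr cutoff := by
  intro arr
  induction arr with
  | nil => simp [List.foldl, set_cutoff_alt]
  | cons i t ih =>
    intro acc
    by_cases h : i < cutoff
    · have hnot : ¬ cutoff ≤ i := by omega
      simp [List.foldl, h, ih, set_cutoff_alt, List.findIdx_cons, hnot, List.replicate_succ]
    · have hle : cutoff ≤ i := by omega
      simp [List.foldl, h, set_cutoff_foldl_true, set_cutoff_alt, List.findIdx_cons, hle]

-- ===== VERDICT (by name: the statement is the Claim_ definition above) =====
theorem set_cutoff_spec : Claim_equal_set_cutoff := by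
  intro arr cutoff _
  unfold Spec_set_cutoff set_cutoff
  simpa using set_cutoff_foldl_false cutoff arr []
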